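-- pv_equiv track=rewrite | github.com/Lecrut/Diffusion-code-generation | data/code/71_5_1.py | middle_element_generator
-- ===== SOURCE A (Python) =====
-- def middle_element_generator(iterable):
--     n = len(iterable)
--     if n == 0:
--         return
--     start = n // 2
--     for i in range(n):
--         if i == start:
--             yield iterable[i]
-- ===== SOURCE B (Python) =====
-- def middle_element_generator(iterable):
--     n = len(iterable)
--     if n == 0:
--         return
--     yield iterable[n // 2]
-- ===== Notes on version B (the rewrite author's own statement) =====
-- stated objective: simpler
-- what changed: B drops A's scan over every index looking for the middle position and yields iterable[n//2] directly with one O(1) subscript.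
import Mathlib
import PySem

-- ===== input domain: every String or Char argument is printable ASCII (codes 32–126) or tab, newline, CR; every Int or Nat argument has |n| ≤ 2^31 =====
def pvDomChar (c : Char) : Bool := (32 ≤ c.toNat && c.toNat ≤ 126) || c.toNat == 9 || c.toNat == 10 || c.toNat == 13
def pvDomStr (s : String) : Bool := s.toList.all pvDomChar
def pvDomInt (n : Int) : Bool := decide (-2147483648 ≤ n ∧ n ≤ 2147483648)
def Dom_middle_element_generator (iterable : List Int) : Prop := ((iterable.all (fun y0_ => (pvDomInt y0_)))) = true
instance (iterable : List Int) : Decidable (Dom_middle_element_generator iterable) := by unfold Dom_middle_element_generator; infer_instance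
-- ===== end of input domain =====

-- B replaces A's full index scan by one direct subscript at n // 2 (objective: simpler).

-- ===== PORT A =====
-- loop 'for i in range(n): if i == start: yield iterable[i]' collected into a list;
-- the index i is always in range, so pyGetD with default 0 is exact here
def middle_element_generator (iterable : List Int) : List Int :=
  let n : Int := iterable.length
  if n = 0 then []
  else
    let start := PySem.Int.floordiv n 2
    (PySem.List.pyRange 0 n 1).foldl
      (fun acc i => if i == start then acc ++ [PySem.List.pyGetD iterable i 0] else acc) []

-- ===== PORT B =====
-- 'if n == 0: return' then a single 'yield iterable[n // 2]' (index in range, so pyGetD is exact)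
def middle_element_generator_alt (iterable : List Int) : List Int :=
  let n : Int := iterable.length
  if n = 0 then []
  else [PySem.List.pyGetD iterable (PySem.Int.floordiv n 2) 0]

-- ===== PRECONDITION & SPEC =====
def Spec_middle_element_generator (iterable : List Int) (out : List Int) : Prop := out = middle_element_generator_alt iterable
instance (iterable : List Int) (out : List Int) : Decidable (Spec_middle_element_generator iterable out) := by unfold Spec_middle_element_generator; infer_instance

-- ===== CLAIM (what is proved, stated in full; the proofs are below) =====
def Claim_equal_middle_element_generator : Prop := ∀ (iterable : List Int), Dom_middle_element_generator iterable → Spec_middle_element_generator iterable (middle_element_generator iterable)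

-- ===== LEMMAS AND PROOFS =====

-- the range 0..n contains the target index s exactly once
theorem filter_pyRange_beq_single (a b s : Int) (h1 : a ≤ s) (h2 : s < b) :
    (PySem.List.pyRange a b 1).filter (fun i => i == s) = [s] := by
  rw [PySem.List.pyRange_one_append a s b h1 (by omega),
      PySem.List.pyRange_one_cons h2, List.filter_append]
  have hl : (PySem.List.pyRange a s 1).filter (fun i => i == s) = [] := by
    rw [List.filter_eq_nil_iff]
    intro x hx
    have := (PySem.List.mem_pyRange_one).1 hx
    simp only [beq_iff_eq]
    omega
  have hr : (PySem.List.pyRange (s + 1) b 1).filter (fun i => i == s) = [] := by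
    rw [List.filter_eq_nil_iff]
    intro x hx
    have := (PySem.List.mem_pyRange_one).1 hx
    simp only [beq_iff_eq]
    omega
  simp [hl, hr]

-- ===== VERDICT (by name: the statement is the Claim_ definition above) =====
theorem middle_element_generator_spec : Claim_equal_middle_element_generator := by
  intro xs _
  unfold Spec_middle_element_generator middle_element_generator middle_element_generator_alt
  by_cases h : (xs.length : Int) = 0
  · simp [h]
  · have hn : 0 < (xs.length : Int) := by omega
    have hs : PySem.Int.floordiv (xs.length : Int) 2 = (xs.length : Int) / 2 :=
      PySem.Int.floordiv_eq_ediv_of_pos (by omega)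
    simp only [h, if_false]
    rw [PySem.List.foldl_append_if (fun i => i == PySem.Int.floordiv (xs.length : Int) 2)
        (fun i => PySem.List.pyGetD xs i 0),
        filter_pyRange_beq_single 0 (xs.length : Int) _ (by omega) (by omega)]
    simp
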